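-- pv_equiv track=rewrite | github.com/mikietechie/c-plus-plus-mcs | 240910/task_e/main.py | function
-- ===== SOURCE A (Python) =====
-- def function(word: str) -> str:
--     """
--     Find the most common letter
--     """
--     word_length = len(word)
--     outer_index = 0
--     most_common_char = ""
--     most_common_count = 0
--     current_char = ""
--     if word_length > 0:
--         most_common_char = word[0]
--         # current_char = word
--     while outer_index < word_length:
--         current_char = word[outer_index]
--         current_count = 0
--         inner_index = 0
--         while inner_index < word_length:
--             char_at_index = word[inner_index]
--             if char_at_index == current_char:
--                 current_count += 1
--             inner_index += 1
--         if current_count > most_common_count: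
--             most_common_count = current_count
--             most_common_char = current_char
--         outer_index += 1
--     return most_common_char
-- ===== SOURCE B (Python) =====
-- def function(word: str) -> str:
--     if not word:
--         return ""
--     counts = {}
--     for c in word:
--         counts[c] = counts.get(c, 0) + 1
--     return max(counts, key=counts.get)
-- ===== Notes on version B (the rewrite author's own statement) =====
-- stated objective: faster
-- what changed: Replaced A's nested index loops (rescanning the whole word for every position) by a single counting pass into an insertion-ordered dict plus a max over the distinct keys, which gives the same first-occurrence tie-break.
import Mathlib
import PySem

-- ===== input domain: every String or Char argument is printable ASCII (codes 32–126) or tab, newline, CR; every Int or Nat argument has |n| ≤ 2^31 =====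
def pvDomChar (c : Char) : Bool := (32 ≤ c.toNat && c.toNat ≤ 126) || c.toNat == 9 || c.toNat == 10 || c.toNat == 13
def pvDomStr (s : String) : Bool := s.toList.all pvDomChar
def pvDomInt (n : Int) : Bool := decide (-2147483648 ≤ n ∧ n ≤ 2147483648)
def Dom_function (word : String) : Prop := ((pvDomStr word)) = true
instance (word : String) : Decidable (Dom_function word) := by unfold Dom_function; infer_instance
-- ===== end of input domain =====

-- B replaces A's nested full-word rescans by one counting pass into an insertion-ordered
-- dict plus a max over the distinct keys (same first-occurrence tie-break); objective: faster (O(n) vs O(n^2), measured).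

-- ===== PORT A =====
-- literal transliteration of A: outer while over positions (= fold over the chars in order),
-- inner while recounting the whole word for each position, strict-> update of the running best
def function (word : String) : String :=
  let cs := word.toList
  let most0 : String := match cs with | [] => "" | c :: _ => String.ofList [c]
  (cs.foldl (fun st c =>
      let cnt := cs.foldl (fun acc d => if d == c then acc + 1 else acc) (0 : Int)
      if cnt > st.2 then (String.ofList [c], cnt) else st)
    (most0, (0 : Int))).1

-- ===== PORT B =====
def function_alt (word : String) : String :=
  if word.toList.isEmpty then "" else
    let counts := word.toList.foldl (fun d c => d.insert c (d.getD c 0 + 1))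
      (PySem.Dict.empty : PySem.Dict Char Int)
    match PySem.List.max? counts.keys (fun c => counts.getD c 0) with
    | some c => String.ofList [c]
    | none => ""

-- ===== PRECONDITION & SPEC =====
def Spec_function (word : String) (out : String) : Prop := out = function_alt word
instance (word : String) (out : String) : Decidable (Spec_function word out) := by unfold Spec_function; infer_instance

-- ===== CLAIM (what is proved, stated in full; the proofs are below) =====
def Claim_equal_function : Prop := ∀ (word : String), Dom_function word → Spec_function word (function word)

-- ===== LEMMAS AND PROOFS =====

-- the key every comparison uses: how often c occurs in the whole word
def pvKey (cs : List Char) (c : Char) : Int := (List.count c cs : Int)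

-- A's outer-loop step, with the inner count loop replaced by its value
def pvG (cs : List Char) (st : String × Int) (c : Char) : String × Int :=
  if pvKey cs c > st.2 then (String.ofList [c], pvKey cs c) else st

-- running max element (strict replacement = keep first on ties)
def pvMaxFrom (cs : List Char) (mc : Char) (l : List Char) : Char :=
  l.foldl (fun m x => if pvKey cs m < pvKey cs x then x else m) mc

-- the elements of l not in seen, first occurrences only, in order
def pvDed : List Char → List Char → List Char
  | _, [] => []
  | seen, c :: t => if c ∈ seen then pvDed seen t else c :: pvDed (seen ++ [c]) t

theorem pvS1 (l : List Char) : ∀ (seen : List Char),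
    List.foldl PySem.Set.add seen l = seen ++ pvDed seen l := by
  induction l with
  | nil => intro seen; simp [pvDed]
  | cons c t ih =>
    intro seen
    by_cases hc : c ∈ seen
    · simp [pvDed, hc, PySem.Set.add, List.foldl_cons, ih]
    · simp only [List.foldl_cons, pvDed, hc]
      have : PySem.Set.add seen c = seen ++ [c] := by simp [PySem.Set.add, hc]
      rw [this, ih (seen ++ [c])]
      simp

theorem pvS2 (cs : List Char) (l : List Char) : ∀ (seen : List Char) (st : String × Int),
    (∀ c ∈ seen, pvKey cs c ≤ st.2) →
    List.foldl (pvG cs) st l = List.foldl (pvG cs) st (pvDed seen l) := by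
  induction l with
  | nil => intro seen st _; simp [pvDed]
  | cons c t ih =>
    intro seen st hinv
    by_cases hc : c ∈ seen
    · have hle : pvKey cs c ≤ st.2 := hinv c hc
      have hstep : pvG cs st c = st := by
        unfold pvG; rw [if_neg]; omega
      simp only [pvDed, hc, if_pos, List.foldl_cons, hstep]
      exact ih seen st hinv
    · simp only [pvDed, hc, List.foldl_cons]
      apply ih (seen ++ [c])
      intro d hd
      have hmono : st.2 ≤ (pvG cs st c).2 := by
        unfold pvG; split_ifs with h <;> simp; omega
      rcases List.mem_append.mp hd with h | h
      · exact le_trans (hinv d h) hmono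
      · have hdc : d = c := by simpa using h
        subst hdc
        unfold pvG; split_ifs with h <;> simp; omega

theorem pvS3 (cs : List Char) (l : List Char) : ∀ (mc : Char),
    List.foldl (pvG cs) (String.ofList [mc], pvKey cs mc) l
      = (String.ofList [pvMaxFrom cs mc l], pvKey cs (pvMaxFrom cs mc l)) := by
  induction l with
  | nil => intro mc; simp [pvMaxFrom]
  | cons c t ih =>
    intro mc
    simp only [List.foldl_cons, pvMaxFrom, pvG]
    by_cases h : pvKey cs mc < pvKey cs c
    · rw [if_pos (by omega), if_pos h]; exact ih c
    · rw [if_neg (by omega), if_neg h]; exact ih mc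

theorem pvS4 (cs : List Char) (l : List Char) : ∀ (mc : Char),
    List.foldl (fun acc x => match acc with
        | none => some x
        | some m => if pvKey cs m < pvKey cs x then some x else some m)
      (some mc) l = some (pvMaxFrom cs mc l) := by
  induction l with
  | nil => intro mc; simp [pvMaxFrom]
  | cons c t ih =>
    intro mc
    rw [List.foldl_cons]
    by_cases h : pvKey cs mc < pvKey cs c
    · have h2 : pvMaxFrom cs mc (c :: t) = pvMaxFrom cs c t := by simp [pvMaxFrom, h]
      rw [h2]
      show List.foldl _ (if pvKey cs mc < pvKey cs c then some c else some mc) t = _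
      rw [if_pos h]; exact ih c
    · have h2 : pvMaxFrom cs mc (c :: t) = pvMaxFrom cs mc t := by simp [pvMaxFrom, h]
      rw [h2]
      show List.foldl _ (if pvKey cs mc < pvKey cs c then some c else some mc) t = _
      rw [if_neg h]; exact ih mc

-- A's step function is pvG
theorem pvStepEq (cs : List Char) :
    (fun (st : String × Int) c =>
      let cnt := cs.foldl (fun acc d => if d == c then acc + 1 else acc) (0 : Int)
      if cnt > st.2 then (String.ofList [c], cnt) else st) = pvG cs := by
  funext st c
  have := PySem.List.foldl_count_if (fun d => d == c) cs 0
  simp only [this, zero_add]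
  rfl

-- B's key function is pvKey
theorem pvKeyEq (cs : List Char) :
    (fun c => (PySem.Dict.counter cs).getD c 0) = pvKey cs := by
  funext c
  rw [PySem.Dict.getD_counter]
  rfl

-- ===== VERDICT (by name: the statement is the Claim_ definition above) =====
theorem function_spec : Claim_equal_function := by
  intro word _
  unfold Spec_function function function_alt
  cases hcs : word.toList with
  | nil => simp
  | cons c0 rest =>
    simp only [List.isEmpty_cons, Bool.false_eq_true, if_false]
    rw [pvStepEq, PySem.Dict.foldl_insert_getD_add_one_eq_counter, pvKeyEq,
        PySem.Dict.keys_counter]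
    -- normalize B's key list: Set.ofList (c0 :: rest) = c0 :: pvDed [c0] rest
    have hofl : PySem.Set.ofList (c0 :: rest) = c0 :: pvDed [c0] rest := by
      show List.foldl PySem.Set.add PySem.Set.empty (c0 :: rest) = _
      rw [pvS1]
      have : pvDed [] (c0 :: rest) = c0 :: pvDed [c0] rest := by
        simp [pvDed]
      simpa using this
    -- B's value
    have hB : PySem.List.max? (PySem.Set.ofList (c0 :: rest)) (pvKey (c0 :: rest))
        = some (pvMaxFrom (c0 :: rest) c0 (pvDed [c0] rest)) := by
      rw [hofl]
      show List.foldl _ none (c0 :: pvDed [c0] rest) = _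
      rw [List.foldl_cons]
      show List.foldl _ (some c0) (pvDed [c0] rest) = _
      convert pvS4 (c0 :: rest) (pvDed [c0] rest) c0 using 2
      funext acc x
      cases acc <;> rfl
    rw [hB]
    -- A's value
    have hpos : (0 : Int) < pvKey (c0 :: rest) c0 := by
      unfold pvKey
      have : 0 < List.count c0 (c0 :: rest) := by simp
      exact_mod_cast this
    rw [pvS2 (c0 :: rest) (c0 :: rest) [] (String.ofList [c0], 0) (by simp)]
    have hded0 : pvDed [] (c0 :: rest) = c0 :: pvDed [c0] rest := by simp [pvDed]
    rw [hded0, List.foldl_cons]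
    have hfirst : pvG (c0 :: rest) (String.ofList [c0], 0) c0
        = (String.ofList [c0], pvKey (c0 :: rest) c0) := by
      unfold pvG; rw [if_pos (by omega)]
    rw [hfirst, pvS3]
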